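-- pv_equiv track=rewrite | github.com/qquartsco-svg/cookiie_brain | solar/day5/mobility_engine.py | _ring_neighbors
-- ===== SOURCE A (Python) =====
-- from typing import List, Optional
--
-- def _ring_neighbors(n_bands: int) -> List[List[int]]:
--     """위도 밴드 이웃 목록 생성.
--
--     물리적 위도 구조:
--         밴드 0        = 남극 (−90°) → 오른쪽(1)만 이웃
--         밴드 1~n-2   = 중위도      → 양쪽(i-1, i+1) 이웃
--         밴드 n-1     = 북극 (+90°) → 왼쪽(n-2)만 이웃
--
--     위도 경계에서 wrap-around 하지 않는다.
--     """
--     neighbors: List[List[int]] = []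
--     for i in range(n_bands):
--         nb: List[int] = []
--         if i > 0:
--             nb.append(i - 1)        # 남쪽 이웃
--         if i < n_bands - 1:
--             nb.append(i + 1)        # 북쪽 이웃
--         neighbors.append(nb)
--     return neighbors
-- ===== SOURCE B (Python) =====
-- from typing import List, Optional
--
-- def _ring_neighbors(n_bands: int) -> List[List[int]]:
--     # Staged construction: build the column of south neighbors and the column
--     # of north neighbors as two shifted lists, then zip them together.
--     if n_bands <= 0:
--         return []
--     souths: List[List[int]] = [[]] + [[i] for i in range(n_bands - 1)]
--     norths: List[List[int]] = [[i] for i in range(1, n_bands)] + [[]]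
--     return [s + t for s, t in zip(souths, norths)]
-- ===== Notes on version B (the rewrite author's own statement) =====
-- stated objective: alternative
-- what changed: Builds the south-neighbor column and the north-neighbor column as two shifted lists and zips them, instead of one loop over bands testing boundary conditions per band.
import Mathlib
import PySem

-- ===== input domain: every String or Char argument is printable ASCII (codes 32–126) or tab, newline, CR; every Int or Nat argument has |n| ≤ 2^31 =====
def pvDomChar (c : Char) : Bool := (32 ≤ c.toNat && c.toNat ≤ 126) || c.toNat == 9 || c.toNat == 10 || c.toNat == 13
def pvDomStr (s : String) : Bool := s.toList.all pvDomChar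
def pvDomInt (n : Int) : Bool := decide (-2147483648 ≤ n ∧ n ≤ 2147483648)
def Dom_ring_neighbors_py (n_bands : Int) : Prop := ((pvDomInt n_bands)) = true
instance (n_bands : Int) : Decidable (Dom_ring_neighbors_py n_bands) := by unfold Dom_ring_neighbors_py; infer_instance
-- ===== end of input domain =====

-- B builds the south-neighbor column and the north-neighbor column as two shifted
-- lists and zips them, instead of one loop over bands with per-band boundary tests
-- (alternative decomposition; same cost).

-- ===== PORT A =====
def ring_neighbors_py (n_bands : Int) : List (List Int) :=
  (PySem.List.pyRange 0 n_bands 1).foldl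
    (fun neighbors i =>
      let nb : List Int := []
      let nb := if 0 < i then nb ++ [i - 1] else nb
      let nb := if i < n_bands - 1 then nb ++ [i + 1] else nb
      neighbors ++ [nb])
    []

-- ===== PORT B =====
def ring_neighbors_py_alt (n_bands : Int) : List (List Int) :=
  if n_bands ≤ 0 then []
  else
    let souths : List (List Int) := [[]] ++ (PySem.List.pyRange 0 (n_bands - 1) 1).map (fun i => [i])
    let norths : List (List Int) := (PySem.List.pyRange 1 n_bands 1).map (fun i => [i]) ++ [[]]
    (souths.zip norths).map (fun p => p.1 ++ p.2)

-- ===== PRECONDITION & SPEC =====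
def Spec_ring_neighbors_py (n_bands : Int) (out : List (List Int)) : Prop := out = ring_neighbors_py_alt n_bands
instance (n_bands : Int) (out : List (List Int)) : Decidable (Spec_ring_neighbors_py n_bands out) := by unfold Spec_ring_neighbors_py; infer_instance

-- ===== CLAIM (what is proved, stated in full; the proofs are below) =====
def Claim_equal_ring_neighbors_py : Prop := ∀ (n_bands : Int), Dom_ring_neighbors_py n_bands → Spec_ring_neighbors_py n_bands (ring_neighbors_py n_bands)

-- ===== LEMMAS AND PROOFS =====

-- the neighbor list of band i (as A computes it)
def pvTarget (n i : Int) : List Int :=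
  (if 0 < i then [i - 1] else []) ++ (if i < n - 1 then [i + 1] else [])

theorem pv_A_eq (n : Int) :
    ring_neighbors_py n = (PySem.List.pyRange 0 n 1).map (pvTarget n) := by
  unfold ring_neighbors_py
  have hf : (fun (neighbors : List (List Int)) (i : Int) =>
      let nb : List Int := []
      let nb := if 0 < i then nb ++ [i - 1] else nb
      let nb := if i < n - 1 then nb ++ [i + 1] else nb
      neighbors ++ [nb]) = fun neighbors i => neighbors ++ [pvTarget n i] := by
    funext a i
    simp only [pvTarget]
    split_ifs <;> simp
  rw [hf, PySem.List.foldl_append_singleton_eq_map]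
  simp

theorem pv_souths_eq (N : Nat) (h : 1 ≤ N) :
    (([] : List Int) :: (List.range (N - 1)).map (fun k : Nat => [(k : Int)]))
      = (List.range N).map (fun j : Nat => if j = 0 then ([] : List Int) else [(j : Int) - 1]) := by
  apply List.ext_getElem
  · simp; omega
  · intro i h1 h2
    simp only [List.getElem_map, List.getElem_range]
    cases i with
    | zero => simp
    | succ j =>
        simp only [List.getElem_cons_succ, List.getElem_map, List.getElem_range]
        have : (j + 1 : Nat) ≠ 0 := by omega
        simp only [this, if_false]
        congr 1
        push_cast
        ring

theorem pv_norths_eq (N : Nat) (h : 1 ≤ N) :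
    ((List.range (N - 1)).map (fun k : Nat => [(k : Int) + 1]) ++ [([] : List Int)])
      = (List.range N).map (fun j : Nat => if j = N - 1 then ([] : List Int) else [(j : Int) + 1]) := by
  apply List.ext_getElem
  · simp; omega
  · intro i h1 h2
    simp only [List.length_map, List.length_range] at h2
    simp only [List.getElem_map, List.getElem_range]
    by_cases hi : i < N - 1
    · rw [List.getElem_append_left (by simpa using hi)]
      simp only [List.getElem_map, List.getElem_range]
      simp [show i ≠ N - 1 by omega]
    · have hie : i = N - 1 := by omega
      rw [List.getElem_append_right (by simpa using hi)]
      simp [hie]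

theorem pv_B_eq (n : Int) :
    ring_neighbors_py_alt n = (PySem.List.pyRange 0 n 1).map (pvTarget n) := by
  unfold ring_neighbors_py_alt
  by_cases hn : n ≤ 0
  · rw [if_pos hn, PySem.List.pyRange_one_eq_nil hn]; simp
  · rw [if_neg hn]
    set N := n.toNat with hN
    have hN1 : 1 ≤ N := by omega
    have e1 : PySem.List.pyRange 0 n 1 = (List.range N).map (fun k : Nat => (k : Int)) := by
      rw [PySem.List.pyRange_one]; simp [hN]
    have e2 : PySem.List.pyRange 0 (n - 1) 1
        = (List.range (N - 1)).map (fun k : Nat => (k : Int)) := by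
      rw [PySem.List.pyRange_one]
      have : (n - 1 - 0).toNat = N - 1 := by omega
      rw [this]; simp
    have e3 : PySem.List.pyRange 1 n 1
        = (List.range (N - 1)).map (fun k : Nat => (k : Int) + 1) := by
      rw [PySem.List.pyRange_one]
      have : (n - 1).toNat = N - 1 := by omega
      rw [this]
      apply List.map_congr_left
      intro k _
      omega
    rw [e1, e2, e3]
    simp only [List.map_map, List.singleton_append, Function.comp_def]
    rw [pv_souths_eq N hN1, pv_norths_eq N hN1, List.zip_map', List.map_map]
    apply List.map_congr_left
    intro j hj
    have hjN : j < N := List.mem_range.mp hj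
    simp only [Function.comp_apply, pvTarget]
    have hleft : (if j = 0 then ([] : List Int) else [(j : Int) - 1])
        = (if 0 < (j : Int) then [(j : Int) - 1] else []) := by
      by_cases h0 : j = 0
      · simp [h0]
      · rw [if_neg h0, if_pos (by omega : (0 : Int) < (j : Int))]
    have hright : (if j = N - 1 then ([] : List Int) else [(j : Int) + 1])
        = (if (j : Int) < n - 1 then [(j : Int) + 1] else []) := by
      by_cases hl : j = N - 1
      · rw [if_pos hl, if_neg (by omega : ¬ ((j : Int) < n - 1))]
      · rw [if_neg hl, if_pos (by omega : (j : Int) < n - 1)]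
    rw [hleft, hright]

-- ===== VERDICT (by name: the statement is the Claim_ definition above) =====
theorem ring_neighbors_py_spec : Claim_equal_ring_neighbors_py := by
  intro n _
  unfold Spec_ring_neighbors_py
  rw [pv_A_eq, pv_B_eq]
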